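-- pv_equiv track=rewrite | github.com/hidaroz/project-medusa | project-medusa/medusa-cli/src/medusa/tools/web_vuln.py | _assess_nikto_severity
-- ===== SOURCE A (Python) =====
-- def _assess_nikto_severity(description: str) -> str:
--     """
--     Assess severity of a Nikto finding based on description
--
--     Args:
--         description: Finding description
--
--     Returns:
--         Severity level: "low", "medium", "high", or "critical"
--     """
--     desc_lower = description.lower()
--
--     # Critical indicators
--     critical_keywords = [
--         'remote code execution', 'arbitrary code', 'command injection',
--         'sql injection', 'authentication bypass', 'arbitrary file'
--     ]
--     if any(keyword in desc_lower for keyword in critical_keywords):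
--         return "critical"
--
--     # High severity indicators
--     high_keywords = [
--         'admin', 'password', 'credential', 'vulnerable', 'exploit',
--         'shell', 'backdoor', 'injection', 'upload', 'directory traversal'
--     ]
--     if any(keyword in desc_lower for keyword in high_keywords):
--         return "high"
--
--     # Medium severity indicators
--     medium_keywords = [
--         'disclosure', 'misconfiguration', 'configuration', 'method',
--         'cookie', 'session', 'redirect', 'xss'
--     ]
--     if any(keyword in desc_lower for keyword in medium_keywords):
--         return "medium"
--
--     # Default to low
--     return "low"
-- ===== SOURCE B (Python) =====
-- # Single flat keyword->rank table scanned once, keeping the minimum rank.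
-- _SEVERITY_TABLE = [
--     ('remote code execution', 0), ('arbitrary code', 0), ('command injection', 0),
--     ('sql injection', 0), ('authentication bypass', 0), ('arbitrary file', 0),
--     ('admin', 1), ('password', 1), ('credential', 1), ('vulnerable', 1),
--     ('exploit', 1), ('shell', 1), ('backdoor', 1), ('injection', 1),
--     ('upload', 1), ('directory traversal', 1),
--     ('disclosure', 2), ('misconfiguration', 2), ('configuration', 2),
--     ('method', 2), ('cookie', 2), ('session', 2), ('redirect', 2), ('xss', 2),
-- ]
--
-- _RANK_TO_NAME = ("critical", "high", "medium", "low")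
--
--
-- def _assess_nikto_severity(description: str) -> str:
--     desc = description.lower()
--     best = 3
--     for keyword, rank in _SEVERITY_TABLE:
--         if keyword in desc:
--             best = min(best, rank)
--     return _RANK_TO_NAME[best]
-- ===== Notes on version B (the rewrite author's own statement) =====
-- stated objective: alternative
-- what changed: Replaced the three ordered short-circuit any() branches with one flat keyword->rank table scanned in a single pass keeping the minimum rank, mapped back to a severity name at the end.
import Mathlib
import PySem

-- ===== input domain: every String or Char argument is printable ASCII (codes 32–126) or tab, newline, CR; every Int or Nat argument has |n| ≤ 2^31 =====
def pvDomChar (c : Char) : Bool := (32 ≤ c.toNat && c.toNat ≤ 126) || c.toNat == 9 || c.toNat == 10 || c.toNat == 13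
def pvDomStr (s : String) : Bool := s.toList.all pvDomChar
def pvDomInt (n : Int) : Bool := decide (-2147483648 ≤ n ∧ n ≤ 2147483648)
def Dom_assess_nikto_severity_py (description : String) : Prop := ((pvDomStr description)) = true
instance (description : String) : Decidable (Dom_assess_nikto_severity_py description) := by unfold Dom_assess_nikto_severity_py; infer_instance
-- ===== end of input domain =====

-- B replaces A's three ordered short-circuit keyword branches with a single pass
-- over one flat keyword->rank table keeping the minimum rank (objective: alternative).


-- ===== PORT A =====
def pvCriticalKeywords : List String :=
  ["remote code execution", "arbitrary code", "command injection",
   "sql injection", "authentication bypass", "arbitrary file"]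

def pvHighKeywords : List String :=
  ["admin", "password", "credential", "vulnerable", "exploit",
   "shell", "backdoor", "injection", "upload", "directory traversal"]

def pvMediumKeywords : List String :=
  ["disclosure", "misconfiguration", "configuration", "method",
   "cookie", "session", "redirect", "xss"]

def assess_nikto_severity_py (description : String) : String :=
  let desc_lower := PySem.Str.lower description
  if pvCriticalKeywords.any (fun keyword => PySem.Str.isIn keyword desc_lower) then
    "critical"
  else if pvHighKeywords.any (fun keyword => PySem.Str.isIn keyword desc_lower) then
    "high"
  else if pvMediumKeywords.any (fun keyword => PySem.Str.isIn keyword desc_lower) then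
    "medium"
  else
    "low"

-- ===== PORT B =====
def pvSeverityTable : List (String × Nat) :=
  [("remote code execution", 0), ("arbitrary code", 0), ("command injection", 0),
   ("sql injection", 0), ("authentication bypass", 0), ("arbitrary file", 0),
   ("admin", 1), ("password", 1), ("credential", 1), ("vulnerable", 1),
   ("exploit", 1), ("shell", 1), ("backdoor", 1), ("injection", 1),
   ("upload", 1), ("directory traversal", 1),
   ("disclosure", 2), ("misconfiguration", 2), ("configuration", 2),
   ("method", 2), ("cookie", 2), ("session", 2), ("redirect", 2), ("xss", 2)]

def pvRankToName : List String := ["critical", "high", "medium", "low"]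

def assess_nikto_severity_py_alt (description : String) : String :=
  let desc := PySem.Str.lower description
  let best := pvSeverityTable.foldl
    (fun best kv => if PySem.Str.isIn kv.1 desc then min best kv.2 else best) 3
  pvRankToName.getD best "low"

-- ===== PRECONDITION & SPEC =====
def Spec_assess_nikto_severity_py (description : String) (out : String) : Prop := out = assess_nikto_severity_py_alt description
instance (description : String) (out : String) : Decidable (Spec_assess_nikto_severity_py description out) := by unfold Spec_assess_nikto_severity_py; infer_instance

-- ===== CLAIM (what is proved, stated in full; the proofs are below) =====
def Claim_equal_assess_nikto_severity_py : Prop := ∀ (description : String), Dom_assess_nikto_severity_py description → Spec_assess_nikto_severity_py description (assess_nikto_severity_py description)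

-- ===== LEMMAS AND PROOFS =====

-- Folding the min-rank step over a constant-rank block is: min with the rank iff some keyword hits.
theorem pv_foldl_block (p : String → Bool) (c : Nat) (l : List String) (r : Nat) :
    (l.map (fun k => (k, c))).foldl
      (fun b (kv : String × Nat) => if p kv.1 then min b kv.2 else b) r
    = if l.any p then min r c else r := by
  induction l generalizing r with
  | nil => simp
  | cons k t ih =>
    simp only [List.map_cons, List.foldl_cons, List.any_cons, ih, Bool.or_eq_true]
    by_cases hp : p k = true <;> by_cases ht : t.any p = true <;>
      simp [hp, ht]

theorem pv_table_split :
    pvSeverityTable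
      = pvCriticalKeywords.map (fun k => (k, 0))
        ++ pvHighKeywords.map (fun k => (k, 1))
        ++ pvMediumKeywords.map (fun k => (k, 2)) := by
  rfl

-- ===== VERDICT (by name: the statement is the Claim_ definition above) =====
theorem assess_nikto_severity_py_spec : Claim_equal_assess_nikto_severity_py := by
  intro description _
  unfold Spec_assess_nikto_severity_py assess_nikto_severity_py assess_nikto_severity_py_alt
  rw [pv_table_split]
  simp only [List.foldl_append,
    pv_foldl_block (fun k => PySem.Str.isIn k (PySem.Str.lower description))]
  cases h1 : pvCriticalKeywords.any (fun k => PySem.Str.isIn k (PySem.Str.lower description)) <;>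
  cases h2 : pvHighKeywords.any (fun k => PySem.Str.isIn k (PySem.Str.lower description)) <;>
  cases h3 : pvMediumKeywords.any (fun k => PySem.Str.isIn k (PySem.Str.lower description)) <;>
    simp [pvRankToName]
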